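-- pv_equiv track=rewrite | github.com/stephaneduarte/FP2P_1415 | proj.py | tabuleiro_preenche_posicao
-- ===== SOURCE A (Python) =====
-- def cria_coordenada(l,c):
--     #recebe dois inteiros e devolve uma coordenada(tuplo)
--     """A funcao verifica se os argumentos sao validos e cria a coordenada correspondente."""
--     if l < 1 or c < 1 or l > 4 or c > 4 or not isinstance(l,int) or not isinstance(c,int):
--         raise ValueError('cria_coordenada: argumentos invalidos')
--     else:
--         return (l,c)
--
-- def coordenada_linha(coord):
--     """A funcao devolve a linha da coordenada."""
--     return coord[0]
--
-- def coordenada_coluna(coord):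
--     """A funcao devolve a coluna da coordenada."""
--     return coord[1]
--
-- def e_coordenada(coord):
--     """A funcao verifica se o argumento corresponde a uma coordenada valida."""
--     return (isinstance(coord,tuple) and len(coord) == 2 and\
--             coord[0] > 0 and coord[0] <= 4 and isinstance(coord[0],int) and\
--             coord[1] > 0 and coord[1] <= 4 and isinstance(coord[1],int))
--
-- def coordenadas_iguais(coord1,coord2):
--     """A funcao verifica se os argumentos sao iguais."""
--     return (coordenada_linha(coord1) == coordenada_linha(coord2) and \
--             coordenada_coluna(coord1) == coordenada_coluna(coord2))
--
-- def tabuleiro_preenche_posicao(tab,coord,val):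
--     """A funcao preenche a coordenada referenciada com o valor inserido."""
--     if not isinstance(val,int) or not e_coordenada(coord):
--         raise ValueError('tabuleiro_preenche_posicao: argumentos invalidos')
--     else:
--         for l in range(1,5):
--             for c in range(1,5):
--                 C = cria_coordenada(l,c)
--                 if coordenadas_iguais(C,coord):
--                     tab[coordenada_linha(C)-1][coordenada_coluna(C)-1] = val
--     return tab
-- ===== SOURCE B (Python) =====
-- def e_coordenada(coord):
--     """A funcao verifica se o argumento corresponde a uma coordenada valida."""
--     return (isinstance(coord,tuple) and len(coord) == 2 and\
--             coord[0] > 0 and coord[0] <= 4 and isinstance(coord[0],int) and\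
--             coord[1] > 0 and coord[1] <= 4 and isinstance(coord[1],int))
--
-- def tabuleiro_preenche_posicao(tab,coord,val):
--     """A funcao preenche a coordenada referenciada com o valor inserido."""
--     if not isinstance(val,int) or not e_coordenada(coord):
--         raise ValueError('tabuleiro_preenche_posicao: argumentos invalidos')
--     tab[coord[0]-1][coord[1]-1] = val
--     return tab
-- ===== Notes on version B (the rewrite author's own statement) =====
-- stated objective: simpler
-- what changed: B keeps the same validation guard but replaces A's scan of all 16 board cells (building each coordinate and comparing it to coord) with one direct O(1) indexed assignment at the coordinate itself.
import Mathlib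
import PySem

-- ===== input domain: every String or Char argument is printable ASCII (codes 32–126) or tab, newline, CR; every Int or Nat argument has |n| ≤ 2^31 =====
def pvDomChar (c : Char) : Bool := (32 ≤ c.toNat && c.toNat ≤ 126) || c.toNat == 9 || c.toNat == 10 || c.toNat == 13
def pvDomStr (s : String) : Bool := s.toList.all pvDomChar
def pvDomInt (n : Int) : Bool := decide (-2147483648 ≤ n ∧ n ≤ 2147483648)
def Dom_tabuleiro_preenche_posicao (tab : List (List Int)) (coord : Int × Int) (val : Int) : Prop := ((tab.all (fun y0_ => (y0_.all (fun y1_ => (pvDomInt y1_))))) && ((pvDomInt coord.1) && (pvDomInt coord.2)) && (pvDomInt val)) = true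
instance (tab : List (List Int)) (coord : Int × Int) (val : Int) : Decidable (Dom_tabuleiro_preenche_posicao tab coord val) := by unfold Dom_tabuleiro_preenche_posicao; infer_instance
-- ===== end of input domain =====

-- B replaces A's 16-cell scan-and-compare with one direct indexed write; both the Python A
-- and the Python B mutate tab in place (same mutation); the equivalence is about the return value.
-- ===== PORT A =====
-- A scans l in range(1,5), c in range(1,5); when (l,c) equals coord it assigns tab[l-1][c-1] = val.
def tabuleiro_preenche_posicao (tab : List (List Int)) (coord : Int × Int) (val : Int) : List (List Int) :=
  (PySem.List.pyRange 1 5 1).foldl (fun accL l =>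
    (PySem.List.pyRange 1 5 1).foldl (fun acc c =>
      if l = coord.1 ∧ c = coord.2 then
        acc.set (l - 1).toNat ((acc.getD (l - 1).toNat []).set (c - 1).toNat val)
      else acc) accL) tab

-- ===== PORT B =====
-- B writes directly: tab[coord[0]-1][coord[1]-1] = val; return tab.
def tabuleiro_preenche_posicao_alt (tab : List (List Int)) (coord : Int × Int) (val : Int) : List (List Int) :=
  tab.set (coord.1 - 1).toNat ((tab.getD (coord.1 - 1).toNat []).set (coord.2 - 1).toNat val)

-- ===== PRECONDITION & SPEC =====
-- Pre_ excludes exactly the inputs where the Python A raises: an out-of-board coordinate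
-- (ValueError) or a board too small to hold the coordinate's cell (IndexError); B raises there too.
def Pre_tabuleiro_preenche_posicao (tab : List (List Int)) (coord : Int × Int) (val : Int) : Prop :=
  1 ≤ coord.1 ∧ coord.1 ≤ 4 ∧ 1 ≤ coord.2 ∧ coord.2 ≤ 4 ∧
  (coord.1 - 1).toNat < tab.length ∧ (coord.2 - 1).toNat < (tab.getD (coord.1 - 1).toNat []).length
instance (tab : List (List Int)) (coord : Int × Int) (val : Int) : Decidable (Pre_tabuleiro_preenche_posicao tab coord val) := by unfold Pre_tabuleiro_preenche_posicao; infer_instance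
def pvWitness_tabuleiro_preenche_posicao : List (List Int) × (Int × Int) × Int :=
  ([[0,0,0,0],[0,0,0,0],[0,0,0,0],[0,0,0,0]], (2,3), 7)

def Spec_tabuleiro_preenche_posicao (tab : List (List Int)) (coord : Int × Int) (val : Int) (out : List (List Int)) : Prop := out = tabuleiro_preenche_posicao_alt tab coord val
instance (tab : List (List Int)) (coord : Int × Int) (val : Int) (out : List (List Int)) : Decidable (Spec_tabuleiro_preenche_posicao tab coord val out) := by unfold Spec_tabuleiro_preenche_posicao; infer_instance

-- ===== CLAIM (what is proved, stated in full; the proofs are below) =====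
def Claim_equal_tabuleiro_preenche_posicao : Prop := ∀ (tab : List (List Int)) (coord : Int × Int) (val : Int), Dom_tabuleiro_preenche_posicao tab coord val → Pre_tabuleiro_preenche_posicao tab coord val → Spec_tabuleiro_preenche_posicao tab coord val (tabuleiro_preenche_posicao tab coord val)

-- ===== LEMMAS AND PROOFS =====
theorem pyRange_1_5 : PySem.List.pyRange 1 5 1 = [1, 2, 3, 4] := by decide


-- ===== VERDICT (by name: the statement is the Claim_ definition above) =====
theorem tabuleiro_preenche_posicao_spec : Claim_equal_tabuleiro_preenche_posicao := by
  intro tab coord val _ hpre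
  obtain ⟨l, c⟩ := coord
  obtain ⟨h1, h2, h3, h4, -, -⟩ := hpre
  unfold Spec_tabuleiro_preenche_posicao tabuleiro_preenche_posicao tabuleiro_preenche_posicao_alt
  simp only at h1 h2 h3 h4 ⊢
  rw [pyRange_1_5]
  interval_cases l <;> interval_cases c <;>
    simp [List.foldl]
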